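-- pv_equiv track=rewrite | github.com/timoteostewart/timbos-hn-reader | temp/test1.py | collect_empty_attributes
-- ===== SOURCE A (Python) =====
-- def collect_empty_attributes(doctype_str: str):
--     in_quote = False  # Flag to track whether we're inside quotes
--     current_substr = ""  # Current substring being collected
--     substrings = []  # List to hold the final substrings
--
--     for char in doctype_str:
--         if char == '"':  # Toggle the in_quote flag when we hit a quote
--             if in_quote:  # If we're ending a quoted string, add it to the list
--                 current_substr += char  # Include the closing quote
--                 substrings.append(current_substr[1:-1])
--                 current_substr = ""
--             else:  # If we're starting a quoted string, save any current substring
--                 if current_substr: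
--                     substrings.append(current_substr)
--                     current_substr = ""
--                 current_substr = char  # Include the opening quote
--             in_quote = not in_quote
--         elif char == "\n" or char == "\t" or char == "\f" or char == " ":
--             if in_quote:
--                 current_substr += char
--             else:
--                 if current_substr:
--                     substrings.append(current_substr)
--                     current_substr = ""
--             # if we're not in quotes, interpret the whitespace as meaning we've ended the attribute
--
--         elif (
--             not in_quote and char == " "
--         ):  # If we're not in quotes and hit a space, end the current substring
--             if current_substr:
--                 substrings.append(current_substr)
--                 current_substr = ""
--         else:
--             current_substr += char  # Add character to the current substring
--
--     # Add the last substring if there's anything left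
--     if current_substr:
--         substrings.append(current_substr)
--
--     return [x.strip() for x in substrings if x.strip() != ""]
-- ===== SOURCE B (Python) =====
-- def collect_empty_attributes(doctype_str: str):
--     # Index-jumping tokenizer: skip delimiters, slice out quoted or plain runs.
--     delims = ' \t\n\f'
--     tokens = []
--     i, n = 0, len(doctype_str)
--     while i < n:
--         c = doctype_str[i]
--         if c in delims:
--             i += 1
--         elif c == '"':
--             j = doctype_str.find('"', i + 1)
--             if j == -1:
--                 tokens.append(doctype_str[i:])
--                 i = n
--             else:
--                 tokens.append(doctype_str[i + 1:j])
--                 i = j + 1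
--         else:
--             j = i
--             while j < n and doctype_str[j] not in delims and doctype_str[j] != '"':
--                 j += 1
--             tokens.append(doctype_str[i:j])
--             i = j
--     return [t.strip() for t in tokens if t.strip() != ""]
-- ===== Notes on version B (the rewrite author's own statement) =====
-- stated objective: alternative
-- what changed: Replaces the per-character in_quote state machine with an index-jumping tokenizer that skips delimiter runs and slices out whole quoted/plain tokens via str.find and run scans.
import Mathlib
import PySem

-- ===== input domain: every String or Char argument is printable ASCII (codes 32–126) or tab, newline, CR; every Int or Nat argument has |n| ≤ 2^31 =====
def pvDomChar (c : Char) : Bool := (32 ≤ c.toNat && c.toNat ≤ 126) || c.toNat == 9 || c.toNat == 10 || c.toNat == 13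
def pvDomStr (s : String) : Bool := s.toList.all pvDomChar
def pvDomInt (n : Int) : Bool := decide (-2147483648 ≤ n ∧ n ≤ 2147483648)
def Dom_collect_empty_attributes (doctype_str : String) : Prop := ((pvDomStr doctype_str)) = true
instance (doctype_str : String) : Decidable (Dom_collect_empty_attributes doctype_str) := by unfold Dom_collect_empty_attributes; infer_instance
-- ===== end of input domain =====

-- B replaces A's per-character in_quote state machine by an index-jumping tokenizer (alternative decomposition, same cost).

-- ===== PORT A =====
-- one step of A's for-loop over the characters; state = (in_quote, current_substr, substrings)
def ceaStepA (st : Bool × List Char × List (List Char)) (ch : Char) :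
    Bool × List Char × List (List Char) :=
  let inq := st.1
  let cur := st.2.1
  let subs := st.2.2
  if ch = '"' then
    if inq then
      let cur' := cur ++ [ch]
      (false, [], subs ++ [PySem.List.slice cur' (some 1) (some (-1))])
    else
      let subs' := if cur ≠ [] then subs ++ [cur] else subs
      (true, [ch], subs')
  else if ch = '\n' ∨ ch = '\t' ∨ ch = '\x0c' ∨ ch = ' ' then
    if inq then (inq, cur ++ [ch], subs)
    else (inq, [], if cur ≠ [] then subs ++ [cur] else subs)
  else if ¬ inq ∧ ch = ' ' then  -- dead elif kept from A
    (inq, [], if cur ≠ [] then subs ++ [cur] else subs)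
  else
    (inq, cur ++ [ch], subs)

def ceaFinishA (st : Bool × List Char × List (List Char)) : List (List Char) :=
  if st.2.1 ≠ [] then st.2.2 ++ [st.2.1] else st.2.2

def collect_empty_attributes (doctype_str : String) : List String :=
  let subs := ceaFinishA (doctype_str.toList.foldl ceaStepA (false, [], []))
  ((subs.map (fun x => PySem.Chars.strip x)).filter (fun x => x ≠ [])).map String.ofList

-- ===== PORT B =====
def ceaDelim (c : Char) : Bool := c = ' ' || c = '\t' || c = '\n' || c = '\x0c'

-- B's while loop: the position i becomes the remaining suffix; s.find('"', i+1) and the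
-- inner run scan become takeWhile/dropWhile on that suffix.
def ceaTokensB : List Char → List (List Char)
  | [] => []
  | c :: rest =>
    if ceaDelim c then ceaTokensB rest
    else if c = '"' then
      match h : rest.dropWhile (· ≠ '"') with
      | [] => [c :: rest.takeWhile (· ≠ '"')]
      | _ :: post =>
        rest.takeWhile (· ≠ '"') :: ceaTokensB post
    else
      (c :: rest.takeWhile (fun ch => !ceaDelim ch && ch ≠ '"')) ::
        ceaTokensB (rest.dropWhile (fun ch => !ceaDelim ch && ch ≠ '"'))
termination_by l => l.length
decreasing_by
  · simp
  · have h1 : (rest.dropWhile (· ≠ '"')).length ≤ rest.length := rest.length_dropWhile_le _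
    rw [h] at h1; simp at h1 ⊢; omega
  · have h1 : (rest.dropWhile (fun ch => !ceaDelim ch && ch ≠ '"')).length ≤ rest.length :=
      rest.length_dropWhile_le _
    simp at h1 ⊢; omega

def collect_empty_attributes_alt (doctype_str : String) : List String :=
  ((( ceaTokensB doctype_str.toList ).map (fun x => PySem.Chars.strip x)).filter
      (fun x => x ≠ [])).map String.ofList

-- ===== PRECONDITION & SPEC =====
def Spec_collect_empty_attributes (doctype_str : String) (out : List String) : Prop := out = collect_empty_attributes_alt doctype_str
instance (doctype_str : String) (out : List String) : Decidable (Spec_collect_empty_attributes doctype_str out) := by unfold Spec_collect_empty_attributes; infer_instance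

-- ===== CLAIM (what is proved, stated in full; the proofs are below) =====
def Claim_equal_collect_empty_attributes : Prop := ∀ (doctype_str : String), Dom_collect_empty_attributes doctype_str → Spec_collect_empty_attributes doctype_str (collect_empty_attributes doctype_str)

-- ===== LEMMAS AND PROOFS =====

def ceaGood (c : Char) : Bool := !ceaDelim c && !decide (c = '"')

lemma ceaGood_lambda : (fun ch => !ceaDelim ch && decide (ch ≠ '"')) = ceaGood := by
  funext c; simp [ceaGood]

lemma cea_takeWhile_append {p : Char → Bool} (cur l : List Char) (h : ∀ c ∈ cur, p c = true) :
    (cur ++ l).takeWhile p = cur ++ l.takeWhile p := by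
  induction cur with
  | nil => simp
  | cons d cs ih =>
      simp [h d (by simp)]
      exact ih (fun c hc => h c (by simp [hc]))

lemma cea_dropWhile_append {p : Char → Bool} (cur l : List Char) (h : ∀ c ∈ cur, p c = true) :
    (cur ++ l).dropWhile p = l.dropWhile p := by
  induction cur with
  | nil => simp
  | cons d cs ih =>
      simp [h d (by simp)]
      exact ih (fun c hc => h c (by simp [hc]))

-- the token list B produces after a plain run `cur` followed by a non-run character
lemma cea_tokensB_plain_cons (cur : List Char) (a : Char) (l : List Char)
    (hne : cur ≠ []) (hall : ∀ c ∈ cur, ceaGood c = true) (ha : ceaGood a = false) :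
    ceaTokensB (cur ++ a :: l) = cur :: ceaTokensB (a :: l) := by
  cases cur with
  | nil => exact absurd rfl hne
  | cons d cs =>
      have hd : ceaGood d = true := hall d (by simp)
      have hcs : ∀ c ∈ cs, ceaGood c = true := fun c hc => hall c (by simp [hc])
      have hdd : ceaDelim d = false := by
        simp [ceaGood] at hd; exact hd.1
      have hdq : d ≠ '"' := by
        simp [ceaGood] at hd; exact hd.2
      have htw : (cs ++ a :: l).takeWhile ceaGood = cs := by
        rw [cea_takeWhile_append cs (a :: l) hcs, List.takeWhile_cons, ha]
        simp
      have hdw : (cs ++ a :: l).dropWhile ceaGood = a :: l := by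
        rw [cea_dropWhile_append cs (a :: l) hcs, List.dropWhile_cons, ha]
        simp
      rw [List.cons_append, ceaTokensB, ceaGood_lambda]
      simp [hdd, hdq, htw, hdw]

lemma cea_tokensB_plain_nil (cur : List Char)
    (hne : cur ≠ []) (hall : ∀ c ∈ cur, ceaGood c = true) :
    ceaTokensB cur = [cur] := by
  cases cur with
  | nil => exact absurd rfl hne
  | cons d cs =>
      have hd : ceaGood d = true := hall d (by simp)
      have hcs : ∀ c ∈ cs, ceaGood c = true := fun c hc => hall c (by simp [hc])
      have hdd : ceaDelim d = false := by simp [ceaGood] at hd; exact hd.1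
      have hdq : d ≠ '"' := by simp [ceaGood] at hd; exact hd.2
      have htw : cs.takeWhile ceaGood = cs := List.takeWhile_eq_self_iff.mpr hcs
      have hdw : cs.dropWhile ceaGood = [] := List.dropWhile_eq_nil_iff.mpr (fun c hc => hcs c hc)
      rw [ceaTokensB, ceaGood_lambda]
      simp [hdd, hdq, htw, hdw, ceaTokensB]

-- A's quoted-state continuation, phrased over B's primitives
def ceaQuoted (qcur l : List Char) : List (List Char) :=
  match l.dropWhile (· ≠ '"') with
  | [] => ['"' :: (qcur ++ l.takeWhile (· ≠ '"'))]
  | _ :: post => (qcur ++ l.takeWhile (· ≠ '"')) :: ceaTokensB post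

lemma ceaQuoted_cons (qcur : List Char) (c : Char) (rest : List Char) (hc : c ≠ '"') :
    ceaQuoted qcur (c :: rest) = ceaQuoted (qcur ++ [c]) rest := by
  unfold ceaQuoted
  rw [List.dropWhile_cons, List.takeWhile_cons]
  simp only [hc, decide_not, decide_true, decide_false, Bool.not_false, if_true]
  cases h : rest.dropWhile (fun x => !decide (x = '"')) <;> simp [hc, h]

lemma cea_tokensB_quote (rest : List Char) :
    ceaTokensB ('"' :: rest) = ceaQuoted [] rest := by
  rw [ceaTokensB]
  have : ceaDelim '"' = false := by decide
  simp only [this, Bool.false_eq_true, if_false, if_pos rfl]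
  unfold ceaQuoted
  cases h : rest.dropWhile (· ≠ '"') <;> simp [h]

lemma cea_tokensB_delim (c : Char) (rest : List Char) (h : ceaDelim c = true) :
    ceaTokensB (c :: rest) = ceaTokensB rest := by
  rw [ceaTokensB]; simp [h]

lemma cea_slice_quote (q : List Char) :
    PySem.List.slice ('"' :: (q ++ ['"'])) (some 1) (some (-1)) = q := by
  simp [PySem.List.slice]

lemma ceaDelim_iff (c : Char) : (c = '\n' ∨ c = '\t' ∨ c = '\x0c' ∨ c = ' ') ↔ ceaDelim c = true := by
  simp [ceaDelim]; tauto

lemma cea_main : ∀ n (l : List Char), l.length ≤ n →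
    (∀ cur subs, (∀ c ∈ cur, ceaGood c = true) →
      ceaFinishA (l.foldl ceaStepA (false, cur, subs)) = subs ++ ceaTokensB (cur ++ l)) ∧
    (∀ qcur subs,
      ceaFinishA (l.foldl ceaStepA (true, '"' :: qcur, subs)) = subs ++ ceaQuoted qcur l) := by
  intro n
  induction n with
  | zero =>
      intro l hl
      have : l = [] := List.length_eq_zero_iff.mp (Nat.le_zero.mp hl)
      subst this
      constructor
      · intro cur subs hall
        by_cases hc : cur = []
        · subst hc; simp [ceaFinishA, ceaTokensB]
        · simp only [List.foldl_nil, ceaFinishA, if_pos hc, List.append_nil]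
          rw [cea_tokensB_plain_nil cur hc hall]
      · intro qcur subs
        simp [ceaFinishA, ceaQuoted]
  | succ n ih =>
      intro l hl
      cases l with
      | nil =>
          -- same as the zero case
          constructor
          · intro cur subs hall
            by_cases hc : cur = []
            · subst hc; simp [ceaFinishA, ceaTokensB]
            · simp only [List.foldl_nil, ceaFinishA, if_pos hc, List.append_nil]
              rw [cea_tokensB_plain_nil cur hc hall]
          · intro qcur subs
            simp [ceaFinishA, ceaQuoted]
      | cons c rest =>
          have hrest : rest.length ≤ n := by simp at hl; omega
          constructor
          · intro cur subs hall
            rw [List.foldl_cons]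
            by_cases hq : c = '"'
            · subst hq
              have hstep : ceaStepA (false, cur, subs) '"' =
                  (true, ['"'], if cur ≠ [] then subs ++ [cur] else subs) := by
                simp [ceaStepA]
              rw [hstep]
              have hQ := (ih rest hrest).2 [] (if cur ≠ [] then subs ++ [cur] else subs)
              rw [hQ]
              by_cases hc : cur = []
              · subst hc
                simp [cea_tokensB_quote]
              · rw [cea_tokensB_plain_cons cur '"' rest hc hall (by simp [ceaGood]),
                    cea_tokensB_quote]
                simp [hc]
            · by_cases hd : ceaDelim c = true
              · have hdisj : c = '\n' ∨ c = '\t' ∨ c = '\x0c' ∨ c = ' ' := (ceaDelim_iff c).mpr hd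
                have hstep : ceaStepA (false, cur, subs) c =
                    (false, [], if cur ≠ [] then subs ++ [cur] else subs) := by
                  simp [ceaStepA, hq, hdisj]
                rw [hstep]
                have hP := ((ih rest hrest).1) [] (if cur ≠ [] then subs ++ [cur] else subs)
                  (by simp)
                rw [hP]
                by_cases hc : cur = []
                · subst hc; simp [cea_tokensB_delim c rest hd]
                · rw [cea_tokensB_plain_cons cur c rest hc hall (by simp [ceaGood, hd]),
                      cea_tokensB_delim c rest hd]
                  simp [hc]
              · have hgood : ceaGood c = true := by simp [ceaGood, hq]; simp at hd; exact hd
                have hnsp : c ≠ ' ' := by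
                  intro h; subst h; simp [ceaDelim] at hd
                have hstep : ceaStepA (false, cur, subs) c = (false, cur ++ [c], subs) := by
                  have hdisj : ¬ (c = '\n' ∨ c = '\t' ∨ c = '\x0c' ∨ c = ' ') := by
                    intro h; exact hd ((ceaDelim_iff c).mp h)
                  push_neg at hdisj
                  obtain ⟨h1, h2, h3, h4⟩ := hdisj
                  simp [ceaStepA, hq, h1, h2, h3, h4]
                rw [hstep]
                have hP := ((ih rest hrest).1) (cur ++ [c]) subs
                  (by intro x hx; rcases List.mem_append.mp hx with h | h
                      · exact hall x h
                      · simp at h; subst h; exact hgood)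
                rw [hP, List.append_assoc]
                simp
          · intro qcur subs
            rw [List.foldl_cons]
            by_cases hq : c = '"'
            · subst hq
              have hstep : ceaStepA (true, '"' :: qcur, subs) '"' =
                  (false, [], subs ++ [PySem.List.slice (('"' :: qcur) ++ ['"']) (some 1) (some (-1))]) := by
                simp [ceaStepA]
              rw [hstep]
              have hsl : PySem.List.slice (('"' :: qcur) ++ ['"']) (some 1) (some (-1)) = qcur := by
                rw [List.cons_append]; exact cea_slice_quote qcur
              rw [hsl]
              have hP := ((ih rest hrest).1) [] (subs ++ [qcur]) (by simp)
              rw [hP]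
              unfold ceaQuoted
              simp
            · have hstep : ceaStepA (true, '"' :: qcur, subs) c = (true, '"' :: (qcur ++ [c]), subs) := by
                by_cases hd : (c = '\n' ∨ c = '\t' ∨ c = '\x0c' ∨ c = ' ')
                · simp [ceaStepA, hq, hd]
                · simp [ceaStepA, hq, hd]
              rw [hstep]
              have hQ := (ih rest hrest).2 (qcur ++ [c]) subs
              rw [hQ, ceaQuoted_cons qcur c rest hq]

theorem cea_tokens_eq (l : List Char) :
    ceaFinishA (l.foldl ceaStepA (false, [], [])) = ceaTokensB l := by
  have := (cea_main l.length l le_rfl).1 [] [] (by simp)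
  simpa using this

-- ===== VERDICT (by name: the statement is the Claim_ definition above) =====
theorem collect_empty_attributes_spec : Claim_equal_collect_empty_attributes := by
  intro s _
  unfold Spec_collect_empty_attributes collect_empty_attributes collect_empty_attributes_alt
  rw [cea_tokens_eq]
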